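-- pv_equiv track=rewrite | github.com/SenneRosaer/Thesis-mutant-density | Gathering/dextool_html_parser.py | extract_output_from_line
-- ===== SOURCE A (Python) =====
-- def extract_output_from_line(line):
--     first_occurance = True
--     output = ""
--     for item in line:
--         if not item.endswith(">"):
--             if first_occurance:
--                 first_occurance = False
--             else:
--                 output += item.split(">")[1]
--     return output
-- ===== SOURCE B (Python) =====
-- def extract_output_from_line(line):
--     # Recursive two-phase state machine: phase 1 (this function) discards
--     # items until the first non-'>'-ending item, which is consumed without
--     # contributing; phase 2 (_gather) concatenates the second '>'-field of
--     # every remaining non-'>'-ending item as the recursion unwinds.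
--     if not line:
--         return ""
--     head, tail = line[0], line[1:]
--     if head.endswith(">"):
--         return extract_output_from_line(tail)
--     return _gather(tail)
--
--
-- def _gather(items):
--     if not items:
--         return ""
--     head, tail = items[0], items[1:]
--     if head.endswith(">"):
--         return _gather(tail)
--     return head.split(">")[1] + _gather(tail)
-- ===== Notes on version B (the rewrite author's own statement) =====
-- stated objective: alternative
-- what changed: Replaced the flag-carrying accumulator loop by a recursive two-phase state machine: a skip phase that consumes items up to and including the first non-'>'-ending one, then a gather phase that concatenates the second '>'-field of the remaining non-'>'-ending items as the recursion unwinds.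
import Mathlib
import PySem

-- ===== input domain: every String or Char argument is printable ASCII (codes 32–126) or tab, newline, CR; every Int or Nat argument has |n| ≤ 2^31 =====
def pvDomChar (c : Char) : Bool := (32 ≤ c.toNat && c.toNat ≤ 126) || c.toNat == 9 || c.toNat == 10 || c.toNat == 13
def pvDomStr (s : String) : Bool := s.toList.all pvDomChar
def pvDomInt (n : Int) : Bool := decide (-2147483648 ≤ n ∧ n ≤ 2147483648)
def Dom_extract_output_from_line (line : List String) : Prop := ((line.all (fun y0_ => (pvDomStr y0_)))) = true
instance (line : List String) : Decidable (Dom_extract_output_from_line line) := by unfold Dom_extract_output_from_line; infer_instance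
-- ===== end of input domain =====

-- B replaces A's flag-carrying single loop by a recursive two-phase (skip, then gather) state machine; same cost, different decomposition.

-- ===== PORT A =====
-- item.split(">")[1]: sep ">" is nonempty so split? is some; under Pre_ index 1 is in range, so the getD defaults are never the value used.
def pvField (item : String) : String :=
  (PySem.List.pyGet? ((PySem.Str.split? item ">").getD []) 1).getD ""

def extract_output_from_line (line : List String) : String :=
  (line.foldl (fun (st : Bool × String) item =>
      if !(PySem.Str.endswith item ">") then
        if st.1 then (false, st.2)
        else (st.1, st.2 ++ pvField item)
      else st)
    (true, "")).2

-- ===== PORT B =====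
def pvGather (items : List String) : String :=
  match items with
  | [] => ""
  | head :: tail =>
    if PySem.Str.endswith head ">" then pvGather tail
    else pvField head ++ pvGather tail

def extract_output_from_line_alt (line : List String) : String :=
  match line with
  | [] => ""
  | head :: tail =>
    if PySem.Str.endswith head ">" then extract_output_from_line_alt tail
    else pvGather tail

-- ===== PRECONDITION & SPEC =====
-- A raises IndexError (split(">")[1]) whenever some non-'>'-ending item after the first such item contains no '>'; Pre_ excludes exactly those inputs (B raises there too).
def Pre_extract_output_from_line (line : List String) : Prop :=
  ∀ item ∈ (line.filter (fun s => !(PySem.Str.endswith s ">"))).drop 1,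
    PySem.Str.isIn ">" item = true
instance (line : List String) : Decidable (Pre_extract_output_from_line line) := by
  unfold Pre_extract_output_from_line; infer_instance

def pvWitness_extract_output_from_line : List String := ["first", "a>b", "end>", "x>y>z"]

def Spec_extract_output_from_line (line : List String) (out : String) : Prop := out = extract_output_from_line_alt line
instance (line : List String) (out : String) : Decidable (Spec_extract_output_from_line line out) := by unfold Spec_extract_output_from_line; infer_instance

-- ===== CLAIM (what is proved, stated in full; the proofs are below) =====
def Claim_equal_extract_output_from_line : Prop := ∀ (line : List String), Dom_extract_output_from_line line → Pre_extract_output_from_line line → Spec_extract_output_from_line line (extract_output_from_line line)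

-- ===== LEMMAS AND PROOFS =====
-- characterisation of A's fold for both values of the flag, in terms of B's two phases
theorem pv_fold_char (line : List String) :
    ∀ out : String,
      ((line.foldl (fun (st : Bool × String) item =>
          if !(PySem.Str.endswith item ">") then
            if st.1 then (false, st.2)
            else (st.1, st.2 ++ pvField item)
          else st) (false, out)).2 = out ++ pvGather line)
      ∧
      ((line.foldl (fun (st : Bool × String) item =>
          if !(PySem.Str.endswith item ">") then
            if st.1 then (false, st.2)
            else (st.1, st.2 ++ pvField item)
          else st) (true, out)).2 = out ++ extract_output_from_line_alt line) := by
  induction line with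
  | nil => intro out; simp [pvGather, extract_output_from_line_alt]
  | cons h t ih =>
    intro out
    by_cases hh : PySem.Chars.endswith h.toList ['>'] = true
    · simpa [pvGather, extract_output_from_line_alt, hh] using ih out
    · constructor
      · simpa [pvGather, hh, String.append_assoc] using (ih (out ++ pvField h)).1
      · simpa [extract_output_from_line_alt, hh] using (ih out).1

-- ===== VERDICT (by name: the statement is the Claim_ definition above) =====
theorem extract_output_from_line_spec : Claim_equal_extract_output_from_line := by
  intro line _ _
  unfold Spec_extract_output_from_line extract_output_from_line
  simpa using (pv_fold_char line "").2
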